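-- pv_equiv track=rewrite | github.com/Mishra-coder/LeetCode | 3637-trionic-array-i/3637-trionic-array-i.py | isTrionic
-- ===== SOURCE A (Python) =====
-- def isTrionic(nums):
--     n = len(nums)
--     i = 1
--
--     while i < n and nums[i] > nums[i-1]:
--         i += 1
--     if i == 1:
--         return False
--
--     p = i
--
--     while i < n and nums[i] < nums[i-1]:
--         i += 1
--     if i == p:
--         return False
--
--     q = i
--
--     while i < n and nums[i] > nums[i-1]:
--         i += 1
--     if i == q:
--         return False
--
--     return i == n
-- ===== SOURCE B (Python) =====
-- def isTrionic(nums):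
--     signs = [(1 if b > a else -1 if b < a else 0) for a, b in zip(nums, nums[1:])]
--     runs = []
--     for s in signs:
--         if not runs or runs[-1] != s:
--             runs.append(s)
--     return runs == [1, -1, 1]
-- ===== Notes on version B (the rewrite author's own statement) =====
-- stated objective: simpler
-- what changed: Replaces the three index-based while loops and early returns with a declarative pass: compute the sign of each consecutive difference, collapse consecutive equal signs into runs, and test that the run list is exactly an up run, then a down run, then an up run.
import Mathlib
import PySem

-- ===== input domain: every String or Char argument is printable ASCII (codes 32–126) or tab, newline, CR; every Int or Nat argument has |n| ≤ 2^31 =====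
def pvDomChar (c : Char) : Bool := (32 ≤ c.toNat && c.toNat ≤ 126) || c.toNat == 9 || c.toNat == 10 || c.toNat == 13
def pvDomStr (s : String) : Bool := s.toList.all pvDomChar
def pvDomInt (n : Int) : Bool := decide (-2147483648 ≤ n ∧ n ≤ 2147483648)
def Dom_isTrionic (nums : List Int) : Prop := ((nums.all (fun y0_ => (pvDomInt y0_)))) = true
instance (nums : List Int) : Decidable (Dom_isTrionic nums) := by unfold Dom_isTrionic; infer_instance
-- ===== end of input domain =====

-- B replaces A's three index-based while loops with a sign list collapsed into runs compared to [1,-1,1] (objective: simpler).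

-- ===== PORT A =====
-- while i < n and nums[i] > nums[i-1]: i += 1
def upA (nums : List Int) (n i : Nat) : Nat :=
  if h : i < n ∧ nums.getD i 0 > nums.getD (i-1) 0 then upA nums n (i+1) else i
termination_by n - i
decreasing_by omega

-- while i < n and nums[i] < nums[i-1]: i += 1
def downA (nums : List Int) (n i : Nat) : Nat :=
  if h : i < n ∧ nums.getD i 0 < nums.getD (i-1) 0 then downA nums n (i+1) else i
termination_by n - i
decreasing_by omega

def isTrionic (nums : List Int) : Bool :=
  let n := nums.length
  let i1 := upA nums n 1
  if i1 = 1 then false else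
  let i2 := downA nums n i1
  if i2 = i1 then false else
  let i3 := upA nums n i2
  if i3 = i2 then false else decide (i3 = n)

-- ===== PORT B =====
-- signs of consecutive differences (zip(nums, nums[1:]))
def signsOf (nums : List Int) : List Int :=
  (nums.zip nums.tail).map (fun p => if p.1 < p.2 then (1 : Int) else if p.2 < p.1 then -1 else 0)

def isTrionic_alt (nums : List Int) : Bool :=
  let runs := (signsOf nums).foldl
    (fun runs s => if runs.getLast? = some s then runs else runs ++ [s]) []
  decide (runs = [1, -1, 1])

-- ===== PRECONDITION & SPEC =====
def Spec_isTrionic (nums : List Int) (out : Bool) : Prop := out = isTrionic_alt nums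
instance (nums : List Int) (out : Bool) : Decidable (Spec_isTrionic nums out) := by unfold Spec_isTrionic; infer_instance

-- ===== CLAIM (what is proved, stated in full; the proofs are below) =====
def Claim_equal_isTrionic : Prop := ∀ (nums : List Int), Dom_isTrionic nums → Spec_isTrionic nums (isTrionic nums)

-- ===== LEMMAS AND PROOFS =====

-- run-collapsing of a sign list, starting from an optional previous sign
def collapseFrom : Option Int → List Int → List Int
  | _, [] => []
  | prev, a :: t => if prev = some a then collapseFrom prev t else a :: collapseFrom (some a) t

theorem foldl_collapse (l acc : List Int) :
    l.foldl (fun runs s => if runs.getLast? = some s then runs else runs ++ [s]) acc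
      = acc ++ collapseFrom acc.getLast? l := by
  induction l generalizing acc with
  | nil => simp [collapseFrom]
  | cons a t ih =>
    simp only [List.foldl_cons, collapseFrom]
    by_cases h : acc.getLast? = some a
    · simp [h, ih]
    · rw [if_neg h, if_neg h, ih (acc ++ [a])]
      have hl : (acc ++ [a]).getLast? = some a := by simp
      rw [hl]
      simp

theorem collapse_some (v : Int) (t : List Int) :
    collapseFrom (some v) t = collapseFrom none (t.dropWhile (fun x => x == v)) := by
  induction t with
  | nil => simp [collapseFrom]
  | cons a t ih =>
    by_cases h : v = a
    · subst h
      simp [collapseFrom, List.dropWhile_cons, ih]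
    · simp [collapseFrom, List.dropWhile_cons, Ne.symm h, h, fun hh => h (Option.some.inj hh)]

theorem collapse_nil_iff (s : List Int) : collapseFrom none s = [] ↔ s = [] := by
  cases s with
  | nil => simp [collapseFrom]
  | cons a t => simp [collapseFrom]

theorem collapse_cons_iff (s : List Int) (v : Int) (r : List Int) :
    collapseFrom none s = v :: r ↔
      s.head? = some v ∧ collapseFrom none (s.dropWhile (fun x => x == v)) = r := by
  cases s with
  | nil => simp [collapseFrom]
  | cons a t =>
    by_cases h : a = v
    · subst h
      simp [collapseFrom, List.dropWhile_cons, collapse_some]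
    · simp [collapseFrom, h, Ne.symm h]

-- drop of the takeWhile-length is dropWhile
theorem drop_len_takeWhile {p : Int → Bool} (s : List Int) :
    s.drop (s.takeWhile p).length = s.dropWhile p := by
  induction s with
  | nil => simp
  | cons a t ih =>
    by_cases h : p a
    · simp [List.takeWhile_cons, List.dropWhile_cons, h, ih]
    · simp [List.takeWhile_cons, List.dropWhile_cons, h]

theorem takeWhile_len_ne_zero (v : Int) (s : List Int) :
    (s.takeWhile (fun x => x == v)).length ≠ 0 ↔ s.head? = some v := by
  cases s with
  | nil => simp
  | cons a t =>
    by_cases h : a = v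
    · subst h; simp [List.takeWhile_cons]
    · simp [List.takeWhile_cons, h]

theorem takeWhile_len_le (p : Int → Bool) (s : List Int) : (s.takeWhile p).length ≤ s.length := by
  induction s with
  | nil => simp
  | cons a t ih =>
    by_cases h : p a <;> simp [List.takeWhile_cons, h] <;> omega

theorem signs_length (nums : List Int) : (signsOf nums).length = nums.length - 1 := by
  simp [signsOf]

theorem signs_getElem (nums : List Int) (j : Nat) (h : j + 1 < nums.length) :
    (signsOf nums)[j]'(by simp [signs_length]; omega)
      = (if nums.getD j 0 < nums.getD (j+1) 0 then (1 : Int)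
         else if nums.getD (j+1) 0 < nums.getD j 0 then -1 else 0) := by
  have h1 : j < nums.length := by omega
  have h2 : j < nums.tail.length := by simp [List.length_tail]; omega
  have e1 : nums.getD j 0 = nums[j] := List.getD_eq_getElem _ _ h1
  have e2 : nums.getD (j+1) 0 = nums[j+1] := List.getD_eq_getElem _ _ h
  rw [e1, e2]
  simp [signsOf, List.getElem_map, List.getElem_zip, List.getElem_tail]

theorem upA_eq (nums : List Int) (k i : Nat) (hk : nums.length - i ≤ k)
    (h1 : 1 ≤ i) (h2 : i ≤ nums.length) :
    upA nums nums.length i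
      = i + (((signsOf nums).drop (i-1)).takeWhile (fun x => x == 1)).length := by
  induction k generalizing i with
  | zero =>
    have hi : i = nums.length := by omega
    rw [upA]
    have : ¬ (i < nums.length ∧ nums.getD i 0 > nums.getD (i-1) 0) := by omega
    rw [dif_neg this]
    rw [List.drop_eq_nil_of_le (by simp [signs_length]; omega)]
    simp
  | succ k ih =>
    by_cases hi : i < nums.length
    · have hj : i - 1 < (signsOf nums).length := by simp [signs_length]; omega
      have hdrop : (signsOf nums).drop (i-1) = (signsOf nums)[i-1] :: (signsOf nums).drop (i-1+1) :=
        List.drop_eq_getElem_cons hj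
      have hval := signs_getElem nums (i-1) (by omega)
      rw [upA]
      by_cases hc : nums.getD i 0 > nums.getD (i-1) 0
      · rw [dif_pos ⟨hi, hc⟩]
        have hsv : (signsOf nums)[i-1]'hj = 1 := by
          rw [hval]
          have : i - 1 + 1 = i := by omega
          rw [this, if_pos hc]
        rw [ih (i+1) (by omega) (by omega) (by omega)]
        rw [hdrop, List.takeWhile_cons, hsv]
        have : i - 1 + 1 = i ∧ i + 1 - 1 = i := by omega
        simp [this.1, this.2]
        omega
      · rw [dif_neg (by tauto)]
        have hsv : (signsOf nums)[i-1]'hj ≠ 1 := by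
          rw [hval]
          have he : i - 1 + 1 = i := by omega
          rw [he, if_neg hc]
          split <;> omega
        rw [hdrop, List.takeWhile_cons]
        simp [hsv]
    · have hieq : i = nums.length := by omega
      rw [upA]
      have : ¬ (i < nums.length ∧ nums.getD i 0 > nums.getD (i-1) 0) := by omega
      rw [dif_neg this]
      rw [List.drop_eq_nil_of_le (by simp [signs_length]; omega)]
      simp

theorem downA_eq (nums : List Int) (k i : Nat) (hk : nums.length - i ≤ k)
    (h1 : 1 ≤ i) (h2 : i ≤ nums.length) :
    downA nums nums.length i
      = i + (((signsOf nums).drop (i-1)).takeWhile (fun x => x == (-1 : Int))).length := by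
  induction k generalizing i with
  | zero =>
    have hi : i = nums.length := by omega
    rw [downA]
    have : ¬ (i < nums.length ∧ nums.getD i 0 < nums.getD (i-1) 0) := by omega
    rw [dif_neg this]
    rw [List.drop_eq_nil_of_le (by simp [signs_length]; omega)]
    simp
  | succ k ih =>
    by_cases hi : i < nums.length
    · have hj : i - 1 < (signsOf nums).length := by simp [signs_length]; omega
      have hdrop : (signsOf nums).drop (i-1) = (signsOf nums)[i-1] :: (signsOf nums).drop (i-1+1) :=
        List.drop_eq_getElem_cons hj
      have hval := signs_getElem nums (i-1) (by omega)
      rw [downA]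
      by_cases hc : nums.getD i 0 < nums.getD (i-1) 0
      · rw [dif_pos ⟨hi, hc⟩]
        have hsv : (signsOf nums)[i-1]'hj = -1 := by
          rw [hval]
          have : i - 1 + 1 = i := by omega
          rw [this, if_neg (by omega), if_pos hc]
        rw [ih (i+1) (by omega) (by omega) (by omega)]
        rw [hdrop, List.takeWhile_cons, hsv]
        have : i - 1 + 1 = i ∧ i + 1 - 1 = i := by omega
        simp [this.1, this.2]
        omega
      · rw [dif_neg (by tauto)]
        have hsv : (signsOf nums)[i-1]'hj ≠ -1 := by
          rw [hval]
          have he : i - 1 + 1 = i := by omega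
          rw [he]
          split <;> omega
        rw [hdrop, List.takeWhile_cons]
        simp [hsv]
    · have hieq : i = nums.length := by omega
      rw [downA]
      have : ¬ (i < nums.length ∧ nums.getD i 0 < nums.getD (i-1) 0) := by omega
      rw [dif_neg this]
      rw [List.drop_eq_nil_of_le (by simp [signs_length]; omega)]
      simp

-- ===== VERDICT (by name: the statement is the Claim_ definition above) =====
theorem isTrionic_spec : Claim_equal_isTrionic := by
  intro nums _
  unfold Spec_isTrionic isTrionic isTrionic_alt
  rw [foldl_collapse]
  simp only [List.nil_append, List.getLast?_nil]
  rcases hnil : nums with _ | ⟨x, xs⟩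
  · simp [upA, signsOf, collapseFrom]
  rw [← hnil]
  have hne : nums.length ≠ 0 := by rw [hnil]; simp
  set s := signsOf nums with hs
  set a := (s.takeWhile (fun x => x == (1:Int))).length with ha
  set s1 := s.dropWhile (fun x => x == (1:Int)) with hs1
  set b := (s1.takeWhile (fun x => x == (-1:Int))).length with hb
  set s2 := s1.dropWhile (fun x => x == (-1:Int)) with hs2
  set c := (s2.takeWhile (fun x => x == (1:Int))).length with hc
  set s3 := s2.dropWhile (fun x => x == (1:Int)) with hs3
  have hslen : s.length = nums.length - 1 := signs_length nums
  have haLe : a ≤ s.length := takeWhile_len_le _ _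
  have hs1d : s1 = s.drop a := (drop_len_takeWhile s).symm
  have hs1len : s1.length = s.length - a := by rw [hs1d]; simp
  have hbLe : b ≤ s1.length := takeWhile_len_le _ _
  have hs2d : s2 = s1.drop b := (drop_len_takeWhile s1).symm
  have hs2len : s2.length = s1.length - b := by rw [hs2d]; simp
  have hcLe : c ≤ s2.length := takeWhile_len_le _ _
  have hs3d : s3 = s2.drop c := (drop_len_takeWhile s2).symm
  have hs3len : s3.length = s2.length - c := by rw [hs3d]; simp
  -- loop 1
  have h1 : upA nums nums.length 1 = 1 + a := by
    have := upA_eq nums nums.length 1 (by omega) (by omega) (by omega)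
    simpa using this
  rw [h1]
  by_cases haz : a = 0
  · -- first run is not ascending: both sides false
    rw [if_pos (by omega)]
    have hhd : ¬ (s.head? = some 1) := by
      rw [← takeWhile_len_ne_zero]; omega
    have hne1 : collapseFrom none s ≠ [1, -1, 1] := by
      intro hh
      exact hhd ((collapse_cons_iff s 1 _).mp hh).1
    simp [hne1]
  · rw [if_neg (by omega)]
    -- loop 2
    have h2 : downA nums nums.length (1+a) = 1 + a + b := by
      have := downA_eq nums nums.length (1+a) (by omega) (by omega) (by omega)
      rw [this]
      have he : 1 + a - 1 = a := by omega
      rw [he, ← hs1d]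
    rw [h2]
    have hhd1 : s.head? = some 1 := by rw [← takeWhile_len_ne_zero]; omega
    have hcol1 : collapseFrom none s = 1 :: collapseFrom none s1 := by
      rw [collapse_cons_iff]; exact ⟨hhd1, rfl⟩
    by_cases hbz : b = 0
    · rw [if_pos (by omega)]
      have hhd : ¬ (s1.head? = some (-1)) := by
        rw [← takeWhile_len_ne_zero]; omega
      have hne1 : collapseFrom none s ≠ [1, -1, 1] := by
        intro hh
        rw [hcol1] at hh
        have h2 := (List.cons.inj hh).2
        exact hhd ((collapse_cons_iff s1 (-1) _).mp h2).1
      simp [hne1]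
    · rw [if_neg (by omega)]
      -- loop 3
      have h3 : upA nums nums.length (1+a+b) = 1 + a + b + c := by
        have := upA_eq nums nums.length (1+a+b) (by omega) (by omega) (by omega)
        rw [this]
        have he : 1 + a + b - 1 = a + b := by omega
        rw [he, ← List.drop_drop, ← hs1d, ← hs2d]
      rw [h3]
      have hhd2 : s1.head? = some (-1) := by rw [← takeWhile_len_ne_zero]; omega
      have hcol2 : collapseFrom none s1 = -1 :: collapseFrom none s2 := by
        rw [collapse_cons_iff]; exact ⟨hhd2, rfl⟩
      by_cases hcz : c = 0
      · rw [if_pos (by omega)]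
        have hhd : ¬ (s2.head? = some 1) := by
          rw [← takeWhile_len_ne_zero]; omega
        have hne1 : collapseFrom none s ≠ [1, -1, 1] := by
          intro hh
          rw [hcol1, hcol2] at hh
          have h2 := (List.cons.inj (List.cons.inj hh).2).2
          exact hhd ((collapse_cons_iff s2 1 _).mp h2).1
        simp [hne1]
      · rw [if_neg (by omega)]
        have hhd3 : s2.head? = some 1 := by rw [← takeWhile_len_ne_zero]; omega
        have hcol3 : collapseFrom none s2 = 1 :: collapseFrom none s3 := by
          rw [collapse_cons_iff]; exact ⟨hhd3, rfl⟩
        have hempty : collapseFrom none s3 = [] ↔ s3 = [] := collapse_nil_iff s3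
        by_cases hfin : 1 + a + b + c = nums.length
        · have hs3nil : s3 = [] := by
            rw [← List.length_eq_zero_iff]; omega
          simp [hcol1, hcol2, hcol3, hs3nil, collapseFrom, hfin]
        · have hs3ne : s3 ≠ [] := by
            intro hh
            have := congrArg List.length hh
            simp [hs3len] at this
            omega
          have hne1 : collapseFrom none s ≠ [1, -1, 1] := by
            intro hh
            rw [hcol1, hcol2, hcol3] at hh
            have h2 := (List.cons.inj (List.cons.inj (List.cons.inj hh).2).2).2
            exact hs3ne (hempty.mp h2)
          simp [hne1, hfin]
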